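-- pv_equiv track=rewrite | github.com/asweigart/programmedpatterns | book/visualpatterns.py | pattern58
-- ===== SOURCE A (Python) =====
-- def pattern58(step):
--     width = 1
--     height = 1
--     for i in range(2, step + 1):
--         if i % 2 == 0:
--             height += 1
--         else:
--             width += 1
--     row = ('O' * width) + '\n'
--     pattern = row * height
--     return pattern
-- ===== SOURCE B (Python) =====
-- def pattern58(step):
--     if step < 2:
--         width = 1
--         height = 1
--     else:
--         width = 1 + (step - 1) // 2
--         height = 1 + step // 2
--     return (('O' * width) + '\n') * height
-- ===== Notes on version B (the rewrite author's own statement) =====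
-- stated objective: simpler
-- what changed: Replaced the parity-counting loop over range(2, step+1) with a closed-form computation of width and height via floor division.
import Mathlib
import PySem

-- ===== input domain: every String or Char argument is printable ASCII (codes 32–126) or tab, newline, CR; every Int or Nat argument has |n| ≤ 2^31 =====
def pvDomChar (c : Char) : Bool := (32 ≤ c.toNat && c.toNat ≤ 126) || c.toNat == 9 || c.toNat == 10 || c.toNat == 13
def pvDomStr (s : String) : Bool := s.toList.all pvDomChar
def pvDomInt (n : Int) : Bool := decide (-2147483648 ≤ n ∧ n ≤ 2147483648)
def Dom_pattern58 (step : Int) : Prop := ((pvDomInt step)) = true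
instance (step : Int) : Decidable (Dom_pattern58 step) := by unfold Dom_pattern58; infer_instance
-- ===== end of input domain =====

-- B replaces A's parity-counting loop with closed-form floor-division dimensions; return values are identical.

-- ===== PORT A =====
-- the loop body: even i bumps height, odd i bumps width (state = (width, height))
def pattern58Step (wh : Int × Int) (i : Int) : Int × Int :=
  if PySem.Int.mod i 2 = 0 then (wh.1, wh.2 + 1) else (wh.1 + 1, wh.2)

def pattern58 (step : Int) : String :=
  let wh := (PySem.List.pyRange 2 (step + 1) 1).foldl pattern58Step (1, 1)
  let row : List Char := PySem.List.pyRepeat ['O'] wh.1 ++ ['\n']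
  String.mk (PySem.List.pyRepeat row wh.2)

-- ===== PORT B =====
def pattern58_alt (step : Int) : String :=
  let wh : Int × Int :=
    if step < 2 then (1, 1)
    else (1 + PySem.Int.floordiv (step - 1) 2, 1 + PySem.Int.floordiv step 2)
  String.mk (PySem.List.pyRepeat (PySem.List.pyRepeat ['O'] wh.1 ++ ['\n']) wh.2)

-- ===== PRECONDITION & SPEC =====
def Spec_pattern58 (step : Int) (out : String) : Prop := out = pattern58_alt step
instance (step : Int) (out : String) : Decidable (Spec_pattern58 step out) := by unfold Spec_pattern58; infer_instance

-- ===== CLAIM (what is proved, stated in full; the proofs are below) =====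
def Claim_equal_pattern58 : Prop := ∀ (step : Int), Dom_pattern58 step → Spec_pattern58 step (pattern58 step)

-- ===== LEMMAS AND PROOFS =====
lemma pattern58_loop_eq (n : Nat) :
    (PySem.List.pyRange 2 ((2 + (n : Int)) + 1) 1).foldl pattern58Step (1, 1)
      = (1 + PySem.Int.floordiv ((2 + (n : Int)) - 1) 2, 1 + PySem.Int.floordiv (2 + (n : Int)) 2) := by
  induction n with
  | zero => decide
  | succ k ih =>
    have h1 : (2 : Int) ≤ 2 + (k : Int) + 1 := by omega
    have hr : PySem.List.pyRange 2 ((2 + ((k + 1 : Nat) : Int)) + 1) 1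
        = PySem.List.pyRange 2 ((2 + (k : Int)) + 1) 1 ++ [2 + (k : Int) + 1] := by
      push_cast
      rw [show (2 : Int) + ((k : Int) + 1) + 1 = ((2 + (k : Int) + 1) + 1) by ring]
      exact PySem.List.pyRange_one_succ_right h1
    rw [hr, List.foldl_append, ih]
    simp only [List.foldl, pattern58Step,
      PySem.Int.mod_eq_emod_of_pos (by norm_num : (0:Int) < 2),
      PySem.Int.floordiv_eq_ediv_of_pos (by norm_num : (0:Int) < 2)]
    push_cast
    split_ifs with h <;> (simp only [Prod.mk.injEq]; constructor <;> omega)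

theorem pattern58_spec : Claim_equal_pattern58 := by
  intro step _
  unfold Spec_pattern58 pattern58 pattern58_alt
  by_cases h : step < 2
  · rw [PySem.List.pyRange_one_eq_nil (by omega)]
    simp [h]
  · have hn : step = 2 + ((step - 2).toNat : Int) := by omega
    rw [if_neg h, hn, pattern58_loop_eq]
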